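-- pv_equiv track=rewrite | github.com/sbula/specweaver | src/specweaver/loom/tools/filesystem/tool.py | _path_matches_grant
-- ===== SOURCE A (Python) =====
-- def _path_matches_grant(
--
--     target: str,
--     grant_path: str,
--     recursive: bool,
-- ) -> bool:
--     """Check if target path falls under a grant.
--
--     For a file path like "src/domain/billing/calc.py":
--     - Grant "src/domain/billing" (recursive=True) → matches
--     - Grant "src/domain/billing" (recursive=False) → matches (direct child)
--     - Grant "src/domain" (recursive=True) → matches
--     - Grant "src/domain" (recursive=False) → does NOT match (calc.py is in billing/)
--     """
--     target_parts = target.replace("\\", "/").split("/")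
--     grant_parts = grant_path.split("/")
--
--     # Target must start with grant path
--     if len(target_parts) < len(grant_parts):
--         return False
--
--     # Check the grant path is a prefix
--     for i, part in enumerate(grant_parts):
--         if i >= len(target_parts) or target_parts[i] != part:
--             return False
--
--     if recursive:
--         # Recursive: all descendants match
--         return True
--
--     # Exclusive: only direct children (one level deeper = direct child of grant dir)
--     depth = len(target_parts) - len(grant_parts)
--     if depth == 0:
--         # Target IS the grant directory itself — match for list operations
--         return True
--     return depth == 1
-- ===== SOURCE B (Python) =====
-- def _path_matches_grant(
--     target: str,
--     grant_path: str,
--     recursive: bool,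
-- ) -> bool:
--     """String-prefix + slash-count reformulation: no component lists, no loop."""
--     t = target.replace("\\", "/")
--     if not (t == grant_path or t.startswith(grant_path + "/")):
--         return False
--     if recursive:
--         return True
--     depth = t.count("/") - grant_path.count("/")
--     return depth <= 1
-- ===== Notes on version B (the rewrite author's own statement) =====
-- stated objective: idiomatic
-- what changed: Replaces splitting both paths into component lists and looping over enumerated components with direct string work: one prefix test (t == grant or t.startswith(grant + '/')) plus a slash-count difference for the depth.
import Mathlib
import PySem

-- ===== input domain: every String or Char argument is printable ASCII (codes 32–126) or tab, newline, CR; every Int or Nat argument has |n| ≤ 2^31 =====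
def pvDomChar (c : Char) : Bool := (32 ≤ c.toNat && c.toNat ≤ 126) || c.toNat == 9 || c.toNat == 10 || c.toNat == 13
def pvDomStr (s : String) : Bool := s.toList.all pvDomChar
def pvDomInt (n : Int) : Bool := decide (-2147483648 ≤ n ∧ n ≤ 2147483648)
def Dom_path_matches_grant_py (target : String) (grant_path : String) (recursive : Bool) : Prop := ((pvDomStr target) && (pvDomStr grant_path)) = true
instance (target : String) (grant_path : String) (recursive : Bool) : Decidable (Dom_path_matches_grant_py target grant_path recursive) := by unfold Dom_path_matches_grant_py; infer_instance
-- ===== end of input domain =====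

-- ===== PORT A =====
-- B replaces A's component-list split and enumerate loop with a string prefix test plus slash-count arithmetic (idiomatic; same cost).
-- A's early-return loop: 'for i, part in enumerate(grant_parts): if i >= len(target_parts) or target_parts[i] != part: return False'
def pvGrantLoop (target_parts : List (List Char)) : List (Int × List Char) → Bool
  | [] => true
  | (i, part) :: rest =>
    if decide ((target_parts.length : Int) ≤ i) || !(PySem.List.pyGet? target_parts i == some part) then false
    else pvGrantLoop target_parts rest

def path_matches_grant_py (target : String) (grant_path : String) (recursive : Bool) : Bool :=
  let target_parts := PySem.Chars.splitOn (PySem.Str.replace target "\\" "/").toList ['/']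
  let grant_parts := PySem.Chars.splitOn grant_path.toList ['/']
  if target_parts.length < grant_parts.length then false
  else if pvGrantLoop target_parts (PySem.List.enumerate grant_parts) = false then false
  else if recursive then true
  else
    let depth : Int := (target_parts.length : Int) - (grant_parts.length : Int)
    if depth = 0 then true else decide (depth = 1)

-- ===== PORT B =====
def path_matches_grant_py_alt (target : String) (grant_path : String) (recursive : Bool) : Bool :=
  let t := PySem.Str.replace target "\\" "/"
  if !(t == grant_path || PySem.Str.startswith t (grant_path ++ "/")) then false
  else if recursive then true
  else
    let depth : Int := (PySem.Str.count t "/" : Int) - (PySem.Str.count grant_path "/" : Int)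
    decide (depth ≤ 1)

-- ===== PRECONDITION & SPEC =====
def Spec_path_matches_grant_py (target : String) (grant_path : String) (recursive : Bool) (out : Bool) : Prop := out = path_matches_grant_py_alt target grant_path recursive
instance (target : String) (grant_path : String) (recursive : Bool) (out : Bool) : Decidable (Spec_path_matches_grant_py target grant_path recursive out) := by unfold Spec_path_matches_grant_py; infer_instance

-- ===== CLAIM (what is proved, stated in full; the proofs are below) =====
def Claim_equal_path_matches_grant_py : Prop := ∀ (target : String) (grant_path : String) (recursive : Bool), Dom_path_matches_grant_py target grant_path recursive → Spec_path_matches_grant_py target grant_path recursive (path_matches_grant_py target grant_path recursive)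

-- ===== LEMMAS AND PROOFS =====

theorem pv_splitOn_go_single (c : Char) (l cur : List Char) (acc : List (List Char)) (fuel : Nat)
    (h : l.length ≤ fuel) :
    PySem.Chars.splitOn.go [c] fuel l cur acc
      = acc.reverse ++ (l.splitOn c).modifyHead (cur.reverse ++ ·) := by
  induction l generalizing fuel cur acc with
  | nil =>
    cases fuel <;> simp [PySem.Chars.splitOn.go, List.splitOn]
  | cons x rest ih =>
    cases fuel with
    | zero => simp at h
    | succ f =>
      rw [PySem.Chars.splitOn.go]
      by_cases hx : c = x
      · subst hx
        have hp : List.isPrefixOf [c] (c :: rest) = true := by simp [List.isPrefixOf]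
        rw [if_pos hp]
        simp only [List.length_singleton, List.drop_one, List.tail_cons]
        rw [ih _ _ f (by simpa using h)]
        simp only [List.splitOn, List.splitOnP_cons, beq_self_eq_true, if_true, List.reverse_cons,
          List.reverse_nil, List.nil_append, List.modifyHead_cons, List.append_assoc,
          List.cons_append, List.nil_append]
        rw [show (fun (x:List Char) => x) = id from rfl, List.modifyHead_id]
        simp
      · have hp : List.isPrefixOf [c] (x :: rest) = false := by
          simp [List.isPrefixOf, hx]
        rw [if_neg (by simp [hp])]
        rw [ih _ _ f (by simpa using h)]
        simp only [List.splitOn, List.splitOnP_cons]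
        rw [if_neg (by simp [Ne.symm hx])]
        rw [List.modifyHead_modifyHead]
        congr 1
        apply congrArg (fun f => List.modifyHead f _) ?_
        funext a
        simp

theorem pv_splitOn_single (c : Char) (s : List Char) :
    PySem.Chars.splitOn s [c] = s.splitOn c := by
  rw [PySem.Chars.splitOn, pv_splitOn_go_single c s [] [] (s.length + 1) (by omega)]
  simp only [List.reverse_nil, List.nil_append]
  rw [show (fun (x:List Char) => x) = id from rfl, List.modifyHead_id]
  rfl

theorem pv_count_go_single (c : Char) (l : List Char) (acc fuel : Nat)
    (h : l.length ≤ fuel) :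
    PySem.Chars.count.go [c] fuel l acc = acc + l.count c := by
  induction l generalizing fuel acc with
  | nil => cases fuel <;> simp [PySem.Chars.count.go]
  | cons x rest ih =>
    cases fuel with
    | zero => simp at h
    | succ f =>
      rw [PySem.Chars.count.go]
      by_cases hx : c = x
      · subst hx
        rw [if_pos (by simp [List.isPrefixOf])]
        simp only [List.length_singleton, List.drop_one, List.tail_cons]
        rw [ih _ f (by simpa using h)]
        simp
        omega
      · rw [if_neg (by simp [List.isPrefixOf, hx])]
        rw [ih _ f (by simpa using h)]
        simp [Ne.symm hx]

theorem pv_count_single (c : Char) (s : List Char) :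
    PySem.Chars.count s [c] = s.count c := by
  rw [PySem.Chars.count, if_neg (by simp)]
  rw [pv_count_go_single c s 0 s.length le_rfl]; omega

theorem pv_length_splitOn (c : Char) (s : List Char) :
    (s.splitOn c).length = s.count c + 1 := by
  induction s with
  | nil => simp [List.splitOn]
  | cons x rest ih =>
    simp only [List.splitOn, List.splitOnP_cons] at *
    by_cases hx : x = c
    · subst hx; simp [ih]
    · simp [hx, ih]

theorem pv_splitOn_prefix_iff (c : Char) (g t : List Char) :
    g.splitOn c <+: t.splitOn c ↔ (g = t ∨ g ++ [c] <+: t) := by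
  induction g generalizing t with
  | nil =>
    cases t with
    | nil => simp [List.splitOn]
    | cons y t' =>
      simp only [List.splitOn, List.splitOnP_nil, List.splitOnP_cons, List.nil_append]
      by_cases hy : y = c
      · subst hy
        constructor
        · intro _; right; exact ⟨t', rfl⟩
        · intro _
          simp [List.prefix_iff_eq_take]
      · rw [if_neg (by simp [hy])]
        obtain ⟨h0, tl, hsp⟩ := List.exists_cons_of_ne_nil (List.splitOnP_ne_nil _ t')
        rw [hsp]
        constructor
        · intro hp
          obtain ⟨r, hr⟩ := hp
          simp at hr
        · rintro (h | ⟨r, hr⟩)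
          · exact absurd h (by simp)
          · simp only [List.singleton_append] at hr
            cases hr; simp at hy
  | cons a g' ih =>
    cases t with
    | nil =>
      simp only [List.splitOn, List.splitOnP_cons, List.splitOnP_nil]
      constructor
      · intro hp
        by_cases ha : a = c
        · rw [if_pos (by simp [ha])] at hp
          obtain ⟨r, hr⟩ := hp
          rcases r with _ | ⟨b, r'⟩ <;> simp at hr
          exact (List.splitOnP_ne_nil _ _ hr).elim
        · rw [if_neg (by simp [ha])] at hp
          obtain ⟨h0, tl, hsp⟩ := List.exists_cons_of_ne_nil (List.splitOnP_ne_nil _ g')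
          rw [hsp] at hp
          obtain ⟨r, hr⟩ := hp
          simp at hr
      · rintro (h | ⟨r, hr⟩)
        · simp at h
        · simp at hr
    | cons x t' =>
      simp only [List.splitOn, List.splitOnP_cons] at *
      by_cases ha : a = c <;> by_cases hx : x = c
      · subst ha; subst hx
        rw [if_pos (by simp), if_pos (by simp)]
        rw [List.cons_prefix_cons]
        constructor
        · rintro ⟨-, hp⟩
          rcases (ih t').mp hp with h | h
          · left; rw [h]
          · right; obtain ⟨r, hr⟩ := h; exact ⟨r, by simp [← hr]⟩
        · rintro (h | ⟨r, hr⟩)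
          · cases h
            exact ⟨rfl, List.prefix_refl _⟩
          · refine ⟨rfl, (ih t').mpr ?_⟩
            simp only [List.cons_append, List.cons.injEq] at hr
            cases hr
            right; exact ⟨r, by tauto⟩
      · subst ha
        rw [if_pos (by simp), if_neg (by simp [hx])]
        obtain ⟨h0, tl, hsp⟩ := List.exists_cons_of_ne_nil (List.splitOnP_ne_nil _ t')
        rw [hsp, List.modifyHead_cons, List.cons_prefix_cons]
        constructor
        · rintro ⟨h, -⟩; simp at h
        · rintro (h | ⟨r, hr⟩)
          · simp at h; tauto
          · simp only [List.cons_append, List.cons.injEq] at hr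
            exact absurd hr.1.symm hx
      · subst hx
        rw [if_neg (by simp [ha]), if_pos (by simp)]
        obtain ⟨h0, tl, hsp⟩ := List.exists_cons_of_ne_nil (List.splitOnP_ne_nil _ g')
        rw [hsp, List.modifyHead_cons, List.cons_prefix_cons]
        constructor
        · rintro ⟨h, -⟩; simp at h
        · rintro (h | ⟨r, hr⟩)
          · cases h; simp at ha
          · simp only [List.cons_append, List.cons.injEq] at hr
            exact absurd hr.1 ha
      · rw [if_neg (by simp [ha]), if_neg (by simp [hx])]
        obtain ⟨h0, tl, hsp⟩ := List.exists_cons_of_ne_nil (List.splitOnP_ne_nil _ g')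
        obtain ⟨h1, tl', hsp'⟩ := List.exists_cons_of_ne_nil (List.splitOnP_ne_nil _ t')
        rw [hsp, hsp', List.modifyHead_cons, List.modifyHead_cons, List.cons_prefix_cons]
        have ihx := (ih t').mp
        have ihy := (ih t').mpr
        rw [hsp, hsp'] at ihx ihy
        constructor
        · rintro ⟨hh, hp⟩
          simp only [List.cons.injEq] at hh
          obtain ⟨rfl, rfl⟩ := hh
          rcases ihx ((List.cons_prefix_cons).mpr ⟨rfl, hp⟩) with h | ⟨r, hr⟩
          · left; rw [h]
          · right; exact ⟨r, by simp [← hr]⟩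
        · rintro (h | ⟨r, hr⟩)
          · obtain ⟨rfl, rfl⟩ := List.cons.inj h
            rw [hsp] at hsp'
            obtain ⟨rfl, rfl⟩ := List.cons.inj hsp'
            exact ⟨rfl, List.prefix_refl _⟩
          · simp only [List.cons_append, List.cons.injEq] at hr
            obtain ⟨rfl, hr⟩ := hr
            have := ihy (Or.inr ⟨r, by rw [← hr]⟩)
            rw [List.cons_prefix_cons] at this
            exact ⟨by rw [this.1], this.2⟩

theorem pv_grantLoop_iff (tp : List (List Char)) (gp : List (List Char)) (k : Nat) :
    pvGrantLoop tp (PySem.List.enumerate gp (k : Int)) = true ↔ gp <+: tp.drop k := by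
  induction gp generalizing k with
  | nil => simp [PySem.List.enumerate, pvGrantLoop]
  | cons p rest ih =>
    rw [PySem.List.enumerate_cons, pvGrantLoop]
    by_cases hk : k < tp.length
    · have hdrop : tp.drop k = tp[k] :: tp.drop (k + 1) := List.drop_eq_getElem_cons hk
      have hget : PySem.List.pyGet? tp (k : Int) = some tp[k] := by
        rw [PySem.List.pyGet?_natCast]
        exact List.getElem?_eq_getElem hk
      by_cases heq : tp[k] = p
      · rw [if_neg (by simp [hget, heq]; omega)]
        have hcast : ((k : Int) + 1) = ((k + 1 : Nat) : Int) := by push_cast; ring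
        rw [hcast, ih (k + 1), hdrop, List.cons_prefix_cons]
        simp [heq]
      · rw [if_pos (by simp [hget, heq])]
        rw [hdrop, List.cons_prefix_cons]
        simp
        intro h
        exact absurd h.symm heq
    · rw [if_pos (by simp; omega)]
      rw [List.drop_eq_nil_of_le (by omega)]
      simp

theorem pv_main (target grant_path : String) (recursive : Bool) :
    path_matches_grant_py target grant_path recursive
      = path_matches_grant_py_alt target grant_path recursive := by
  unfold path_matches_grant_py path_matches_grant_py_alt
  simp only [pv_splitOn_single]
  have hslash : ("/" : String).toList = ['/'] := by decide
  have hsw : PySem.Str.startswith (PySem.Str.replace target "\\" "/") (grant_path ++ "/") = true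
      ↔ grant_path.toList ++ ['/'] <+: (PySem.Str.replace target "\\" "/").toList := by
    rw [PySem.Str.startswith, PySem.Chars.startswith_iff, String.toList_append, hslash]
  have heqs : ((PySem.Str.replace target "\\" "/") == grant_path) = true
      ↔ (PySem.Str.replace target "\\" "/").toList = grant_path.toList := by
    rw [beq_iff_eq, String.toList_inj]
  have hct : PySem.Str.count (PySem.Str.replace target "\\" "/") "/"
      = (PySem.Str.replace target "\\" "/").toList.count '/' := by
    rw [PySem.Str.count, hslash, pv_count_single]
  have hcg : PySem.Str.count grant_path "/" = grant_path.toList.count '/' := by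
    rw [PySem.Str.count, hslash, pv_count_single]
  rw [hct, hcg]
  set b1 := ((PySem.Str.replace target "\\" "/") == grant_path) with hb1
  set b2 := PySem.Str.startswith (PySem.Str.replace target "\\" "/") (grant_path ++ "/") with hb2
  set tl := (PySem.Str.replace target "\\" "/").toList with htl
  set g := grant_path.toList with hg
  clear_value b1 b2 tl g
  clear hb1 hb2 htl hg hct hcg
  by_cases hm : g.splitOn '/' <+: tl.splitOn '/'
  · have hmatch : g = tl ∨ g ++ ['/'] <+: tl := (pv_splitOn_prefix_iff '/' g tl).mp hm
    have hlen : (g.splitOn '/').length ≤ (tl.splitOn '/').length := hm.length_le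
    rw [if_neg (by omega)]
    have hloop : pvGrantLoop (tl.splitOn '/') (PySem.List.enumerate (g.splitOn '/')) = true := by
      have := (pv_grantLoop_iff (tl.splitOn '/') (g.splitOn '/') 0).mpr (by simpa using hm)
      simpa using this
    rw [hloop]
    simp only [Bool.true_eq_false, if_false]
    have hcond : (b1 || b2) = true := by
      rcases hmatch with h | h
      · rw [heqs.mpr h.symm, Bool.true_or]
      · rw [hsw.mpr h, Bool.or_true]
    rw [hcond]
    simp only [Bool.not_true, Bool.false_eq_true, if_false]
    cases recursive with
    | true => simp
    | false =>
      simp only [Bool.false_eq_true, if_false]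
      have h1 := pv_length_splitOn '/' tl
      have h2 := pv_length_splitOn '/' g
      by_cases hz : ((tl.splitOn '/').length : Int) - ((g.splitOn '/').length : Int) = 0
      · rw [if_pos hz]
        have hle : (tl.count '/' : Int) - (g.count '/' : Int) ≤ 1 := by omega
        simp [hle]
      · rw [if_neg hz]
        simp only [decide_eq_decide]
        omega
  · have hnm : ¬ (g = tl ∨ g ++ ['/'] <+: tl) := fun h => hm ((pv_splitOn_prefix_iff '/' g tl).mpr h)
    have hcond : (b1 || b2) = false := by
      rcases hb : b1 with _ | _
      · rcases hs : b2 with _ | _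
        · rfl
        · exact absurd (Or.inr (hsw.mp hs)) hnm
      · exact absurd (Or.inl (heqs.mp hb).symm) hnm
    rw [hcond]
    simp only [Bool.not_false, if_true]
    by_cases hl : (tl.splitOn '/').length < (g.splitOn '/').length
    · rw [if_pos hl]
    · rw [if_neg hl]
      have hloop : pvGrantLoop (tl.splitOn '/') (PySem.List.enumerate (g.splitOn '/')) = false := by
        rcases hb : pvGrantLoop (tl.splitOn '/') (PySem.List.enumerate (g.splitOn '/')) with _ | _
        · rfl
        · have := (pv_grantLoop_iff (tl.splitOn '/') (g.splitOn '/') 0).mp (by simpa using hb)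
          simp at this
          exact absurd this hm
      rw [hloop]
      simp

-- ===== VERDICT (by name: the statement is the Claim_ definition above) =====
theorem path_matches_grant_py_spec : Claim_equal_path_matches_grant_py := by
  intro target grant_path recursive _
  unfold Spec_path_matches_grant_py
  exact pv_main target grant_path recursive
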